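-- pv_equiv track=rewrite | github.com/Champ-CEO/agentgist | agentgist/groq_strategies.py | optimize_prompt
-- ===== SOURCE A (Python) =====
-- def optimize_prompt(prompt: str) -> str:
--     """Optimize prompts to be more token-efficient."""
--     # Remove redundant whitespace
--     optimized = " ".join(prompt.split())
--
--     # Replace common verbose phrases with shorter equivalents
--     replacements = {
--         "in order to": "to",
--         "for the purpose of": "to",
--         "a large number of": "many",
--         "a significant amount of": "much",
--         "at this point in time": "now",
--         "due to the fact that": "because",
--         "in the event that": "if",
--     }
--
--     for verbose, concise in replacements.items():
--         optimized = optimized.replace(verbose, concise)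
--
--     return optimized
-- ===== SOURCE B (Python) =====
-- def optimize_prompt(prompt: str) -> str:
--     # One-pass whitespace normalization with a pending-space flag (no word list),
--     # then the seven phrase replacements written as one explicit chain.
--     out = []
--     prev_space = True
--     for ch in prompt:
--         if ch.isspace():
--             prev_space = True
--         else:
--             if prev_space and out:
--                 out.append(" ")
--             out.append(ch)
--             prev_space = False
--     optimized = "".join(out)
--     return (optimized
--             .replace("in order to", "to")
--             .replace("for the purpose of", "to")
--             .replace("a large number of", "many")
--             .replace("a significant amount of", "much")
--             .replace("at this point in time", "now")
--             .replace("due to the fact that", "because")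
--             .replace("in the event that", "if"))
-- ===== Notes on version B (the rewrite author's own statement) =====
-- stated objective: alternative
-- what changed: Whitespace normalization is done in one character-level pass with a pending-space flag instead of split()+join() building an intermediate word list, and the seven replacements are an explicit chain instead of a loop over a dict.
import Mathlib
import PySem

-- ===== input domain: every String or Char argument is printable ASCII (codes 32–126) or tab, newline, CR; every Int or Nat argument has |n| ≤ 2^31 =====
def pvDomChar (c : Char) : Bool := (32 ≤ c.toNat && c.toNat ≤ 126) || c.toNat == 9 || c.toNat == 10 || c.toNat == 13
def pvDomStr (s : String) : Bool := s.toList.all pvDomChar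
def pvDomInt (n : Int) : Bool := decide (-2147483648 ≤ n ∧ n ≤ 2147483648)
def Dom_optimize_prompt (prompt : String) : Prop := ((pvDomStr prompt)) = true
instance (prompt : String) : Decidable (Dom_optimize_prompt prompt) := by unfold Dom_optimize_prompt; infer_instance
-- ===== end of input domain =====

-- B replaces the split()/join() whitespace normalization by a single character-level
-- pass with a pending-space flag and writes the seven replacements as an explicit
-- chain; same return value, no intermediate word list (objective: alternative).


-- ===== PORT A =====
-- A: optimized = " ".join(prompt.split()); then a loop over the replacement dict items.
def optimize_prompt (prompt : String) : String :=
  let optimized := PySem.Str.join " " (PySem.Str.split₀ prompt)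
  let replacements : List (String × String) :=
    [("in order to", "to"), ("for the purpose of", "to"), ("a large number of", "many"),
     ("a significant amount of", "much"), ("at this point in time", "now"),
     ("due to the fact that", "because"), ("in the event that", "if")]
  replacements.foldl (fun opt p => PySem.Str.replace opt p.1 p.2) optimized

-- ===== PORT B =====
-- B's loop state: (out, prev_space); a space only sets the flag, a word char emits
-- a single separating space when the flag is set and out is nonempty.
def pvNormStep (st : List Char × Bool) (ch : Char) : List Char × Bool :=
  if PySem.Chars.isspace ch then (st.1, true)
  else (st.1 ++ (if st.2 && !st.1.isEmpty then [' ', ch] else [ch]), false)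

def optimize_prompt_alt (prompt : String) : String :=
  let optimized := String.ofList (prompt.toList.foldl pvNormStep ([], true)).1
  PySem.Str.replace (PySem.Str.replace (PySem.Str.replace (PySem.Str.replace (PySem.Str.replace
    (PySem.Str.replace (PySem.Str.replace optimized
      "in order to" "to") "for the purpose of" "to") "a large number of" "many")
      "a significant amount of" "much") "at this point in time" "now")
      "due to the fact that" "because") "in the event that" "if"

-- ===== PRECONDITION & SPEC =====
def Spec_optimize_prompt (prompt : String) (out : String) : Prop := out = optimize_prompt_alt prompt
instance (prompt : String) (out : String) : Decidable (Spec_optimize_prompt prompt out) := by unfold Spec_optimize_prompt; infer_instance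

-- ===== CLAIM (what is proved, stated in full; the proofs are below) =====
def Claim_equal_optimize_prompt : Prop := ∀ (prompt : String), Dom_optimize_prompt prompt → Spec_optimize_prompt prompt (optimize_prompt prompt)

-- ===== LEMMAS AND PROOFS =====

-- the string B has built when A's split-scanner holds current word `cur` (reversed) and finished words `acc` (reversed)
def pvEmit (cur : List Char) (acc : List (List Char)) : List Char :=
  PySem.Chars.join [' '] acc.reverse ++
    (if cur.isEmpty then [] else (if acc.isEmpty then [] else [' ']) ++ cur.reverse)

theorem pvJoinSnoc (xs : List (List Char)) (y : List Char) :
    PySem.Chars.join [' '] (xs ++ [y]) =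
      PySem.Chars.join [' '] xs ++ (if xs.isEmpty then [] else [' ']) ++ y := by
  induction xs with
  | nil => simp [PySem.Chars.join_nil, PySem.Chars.join_singleton]
  | cons a t ih =>
    cases t with
    | nil => simp [PySem.Chars.join_cons_cons, PySem.Chars.join_singleton]
    | cons b u =>
      have h1 : (a :: b :: u) ++ [y] = a :: ((b :: u) ++ [y]) := rfl
      have h2 : (b :: u) ++ [y] = b :: (u ++ [y]) := rfl
      rw [h1, h2, PySem.Chars.join_cons_cons, ← h2, ih, PySem.Chars.join_cons_cons]
      simp

theorem pvJoinEmptyIff (l : List (List Char)) (h : ∀ w ∈ l, w ≠ []) :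
    (PySem.Chars.join [' '] l).isEmpty = l.isEmpty := by
  cases l with
  | nil => simp [PySem.Chars.join_nil]
  | cons a t =>
    cases t with
    | nil =>
      have := h a (by simp)
      simp [PySem.Chars.join_singleton, this]
    | cons b u =>
      rw [PySem.Chars.join_cons_cons]
      simp

theorem pvInv (cs : List Char) : ∀ (cur : List Char) (acc : List (List Char)),
    (∀ w ∈ acc, w ≠ []) →
    PySem.Chars.join [' '] (PySem.Chars.split₀.go cs cur acc) =
      (cs.foldl pvNormStep (pvEmit cur acc, cur.isEmpty)).1 := by
  induction cs with
  | nil =>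
    intro cur acc hacc
    rw [PySem.Chars.split₀.go]
    by_cases hc : cur.isEmpty
    · simp [hc, pvEmit]
    · simp only [hc, if_neg, Bool.false_eq_true, not_false_eq_true, List.foldl_nil]
      simp only [List.reverse_cons, pvJoinSnoc, pvEmit, hc]
      simp
  | cons c rest ih =>
    intro cur acc hacc
    rw [PySem.Chars.split₀.go]
    by_cases hsp : PySem.Chars.isspace c
    · by_cases hc : cur.isEmpty
      · have hcur : cur = [] := List.isEmpty_iff.mp hc
        subst hcur
        simp only [hsp, if_true, List.isEmpty_nil, List.foldl_cons]
        have hstep : pvNormStep (pvEmit [] acc, true) c = (pvEmit [] acc, true) := by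
          simp [pvNormStep, hsp]
        rw [hstep, ih [] acc hacc]
        simp
      · simp only [hsp, if_true, hc, Bool.false_eq_true, if_false, List.foldl_cons]
        have hstep : pvNormStep (pvEmit cur acc, false) c = (pvEmit cur acc, true) := by
          simp [pvNormStep, hsp]
        rw [hstep]
        have hacc' : ∀ w ∈ (cur.reverse :: acc), w ≠ [] := by
          intro w hw
          rcases List.mem_cons.mp hw with hw | hw
          · subst hw
            have : cur ≠ [] := List.isEmpty_iff.not.mp (by simpa using hc)
            simpa using this
          · exact hacc w hw
        rw [ih [] (cur.reverse :: acc) hacc']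
        have hemit : pvEmit [] (cur.reverse :: acc) = (pvEmit cur acc, true).1 := by
          simp only [pvEmit, List.isEmpty_nil, if_true, List.append_nil,
            List.reverse_cons, pvJoinSnoc, hc]
          simp
        rw [hemit]
        simp
    · simp only [hsp, Bool.false_eq_true, if_false, List.foldl_cons]
      have hstep : pvNormStep (pvEmit cur acc, cur.isEmpty) c = (pvEmit (c :: cur) acc, false) := by
        by_cases hc : cur.isEmpty
        · have hcur : cur = [] := List.isEmpty_iff.mp hc
          subst hcur
          simp only [pvNormStep, hsp, Bool.false_eq_true, if_false]
          have hout : (PySem.Chars.join [' '] acc.reverse).isEmpty = acc.isEmpty := by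
            simpa using pvJoinEmptyIff acc.reverse (by simpa using hacc)
          by_cases ha : acc.isEmpty
          · have hje : PySem.Chars.join [' '] acc.reverse = [] :=
              List.isEmpty_iff.mp (by rw [hout]; exact ha)
            simp [pvEmit, ha, hje]
          · have hje : ¬ PySem.Chars.join [' '] acc.reverse = [] := by
              intro h
              exact ha (by rw [← hout, h]; rfl)
            simp [pvEmit, ha, hje]
        · simp only [pvNormStep, hsp, Bool.false_eq_true, if_false, hc, Bool.false_and]
          simp [pvEmit, hc]
      rw [hstep]
      have : false = (c :: cur).isEmpty := by simp
      rw [this]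
      exact ih (c :: cur) acc hacc

theorem pvNorm (p : String) :
    PySem.Str.join " " (PySem.Str.split₀ p) =
      String.ofList (p.toList.foldl pvNormStep ([], true)).1 := by
  apply String.toList_inj.mp
  rw [PySem.Str.toList_join, PySem.Str.split₀_map_toList]
  have h1 : (" " : String).toList = [' '] := by decide
  rw [h1, String.toList_ofList]
  have := pvInv p.toList [] [] (by simp)
  simpa [PySem.Chars.split₀, pvEmit, PySem.Chars.join_nil] using this

-- ===== VERDICT (by name: the statement is the Claim_ definition above) =====
theorem optimize_prompt_spec : Claim_equal_optimize_prompt := by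
  intro prompt _
  unfold Spec_optimize_prompt optimize_prompt optimize_prompt_alt
  simp only [List.foldl_cons, List.foldl_nil, pvNorm]
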